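-- pv_equiv track=rewrite | github.com/JotatD/safe-vision | filtered.py | has_valid_refusal
-- ===== SOURCE A (Python) =====
-- def has_valid_refusal(chosen_text: str) -> bool:
--     """
--     Check if the chosen response contains valid refusal phrases.
--
--     Args:
--         chosen_text: The chosen response text
--
--     Returns:
--         True if contains "sorry" or "I cannot" (case-insensitive)
--     """
--     if not chosen_text:
--         return False
--
--     chosen_lower = chosen_text.lower()
--
--     # Check for refusal patterns
--     refusal_patterns = [
--         "sorry",
--         "i cannot",
--         "i can't",
--         "i'm unable",
--         "i am unable",
--         "cannot provide",
--         "can't provide",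
--         "cannot assist",
--         "can't assist",
--         "cannot help",
--         "can't help"
--     ]
--
--     return any(pattern in chosen_lower for pattern in refusal_patterns)
-- ===== SOURCE B (Python) =====
-- # B: one left-to-right positional scan; at each index a case-insensitive prefix
-- # match against the refusal phrases, instead of lowering the whole text and
-- # running 11 separate substring searches.
--
-- REFUSAL_PATTERNS = (
--     "sorry",
--     "i cannot",
--     "i can't",
--     "i'm unable",
--     "i am unable",
--     "cannot provide",
--     "can't provide",
--     "cannot assist",
--     "can't assist",
--     "cannot help",
--     "can't help",
-- )
--
--
-- def has_valid_refusal(chosen_text: str) -> bool: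
--     for i in range(len(chosen_text)):
--         for p in REFUSAL_PATTERNS:
--             if chosen_text[i:i + len(p)].lower() == p:
--                 return True
--     return False
-- ===== Notes on version B (the rewrite author's own statement) =====
-- stated objective: alternative
-- what changed: B replaces A's whole-text lowercasing followed by 11 independent substring scans with a single left-to-right scan that, at each position, does a case-insensitive prefix match against the phrase list.
import Mathlib
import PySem

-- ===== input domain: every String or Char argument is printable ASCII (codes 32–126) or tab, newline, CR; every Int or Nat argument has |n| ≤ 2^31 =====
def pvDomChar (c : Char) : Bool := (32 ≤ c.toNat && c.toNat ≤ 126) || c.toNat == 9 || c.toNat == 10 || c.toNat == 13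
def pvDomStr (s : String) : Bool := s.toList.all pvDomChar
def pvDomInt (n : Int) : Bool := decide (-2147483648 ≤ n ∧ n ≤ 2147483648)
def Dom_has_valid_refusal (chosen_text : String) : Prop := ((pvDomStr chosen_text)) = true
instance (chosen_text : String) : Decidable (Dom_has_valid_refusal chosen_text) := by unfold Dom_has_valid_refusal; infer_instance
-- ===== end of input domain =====

-- B replaces A's lower-the-whole-text + 11 substring scans by a single positional scan
-- with case-insensitive prefix matching; same return value (alternative decomposition).

-- ===== PORT A =====
def pvRefusalPatterns : List String :=
  ["sorry", "i cannot", "i can't", "i'm unable", "i am unable",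
   "cannot provide", "can't provide", "cannot assist", "can't assist",
   "cannot help", "can't help"]

def has_valid_refusal (chosen_text : String) : Bool :=
  if PySem.Str.len chosen_text == 0 then false
  else
    let chosen_lower := PySem.Str.lower chosen_text
    pvRefusalPatterns.any (fun pattern => PySem.Str.isIn pattern chosen_lower)

-- ===== PORT B =====
def pvRefusalPatternsAlt : List String :=
  ["sorry", "i cannot", "i can't", "i'm unable", "i am unable",
   "cannot provide", "can't provide", "cannot assist", "can't assist",
   "cannot help", "can't help"]

def has_valid_refusal_alt (chosen_text : String) : Bool :=
  (PySem.List.pyRange 0 (PySem.Str.len chosen_text) 1).any (fun i =>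
    pvRefusalPatternsAlt.any (fun p =>
      PySem.Str.lower (PySem.Str.slice chosen_text (some i)
        (some (i + PySem.Str.len p))) == p))

-- ===== PRECONDITION & SPEC =====
def Spec_has_valid_refusal (chosen_text : String) (out : Bool) : Prop := out = has_valid_refusal_alt chosen_text
instance (chosen_text : String) (out : Bool) : Decidable (Spec_has_valid_refusal chosen_text out) := by unfold Spec_has_valid_refusal; infer_instance

-- ===== CLAIM (what is proved, stated in full; the proofs are below) =====
def Claim_equal_has_valid_refusal : Prop := ∀ (chosen_text : String), Dom_has_valid_refusal chosen_text → Spec_has_valid_refusal chosen_text (has_valid_refusal chosen_text)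

-- ===== LEMMAS AND PROOFS =====

-- lowering commutes with drop (PySem.Chars.lower is a per-character map)
lemma pv_lower_drop (cs : List Char) (j : Nat) :
    (PySem.Chars.lower cs).drop j = PySem.Chars.lower (cs.drop j) := by
  simp [PySem.Chars.lower]

-- lowering commutes with take
lemma pv_lower_take (cs : List Char) (n : Nat) :
    (PySem.Chars.lower cs).take n = PySem.Chars.lower (cs.take n) := by
  simp [PySem.Chars.lower]

-- One pattern's substring test in the lowered text ↔ some position admits a
-- case-insensitive prefix match of that pattern.
lemma pv_isIn_lower_iff (cs p : List Char) (hp : p ≠ []) :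
    PySem.Chars.isIn p (PySem.Chars.lower cs) = true ↔
      ∃ i < cs.length, PySem.Chars.lower ((cs.drop i).take p.length) = p := by
  rw [← PySem.Chars.exists_prefix_drop_iff_isIn]
  constructor
  · rintro ⟨j, hj⟩
    rw [pv_lower_drop] at hj
    have hlen : p.length ≤ (cs.drop j).length := by
      have := hj.length_le
      simpa [PySem.Chars.lower] using this
    refine ⟨j, ?_, ?_⟩
    · have hp' : 0 < p.length := List.length_pos_iff.mpr hp
      have hj' : p.length ≤ cs.length - j := by simpa using hlen
      omega
    · have ht := List.prefix_iff_eq_take.mp hj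
      rw [← pv_lower_take]
      exact ht.symm
  · rintro ⟨i, _, heq⟩
    refine ⟨i, ?_⟩
    have hpre : ((cs.drop i).take p.length) <+: cs.drop i := List.take_prefix _ _
    have hmap := hpre.map PySem.Chars.lowerChar
    rw [pv_lower_drop, ← heq]
    simpa [PySem.Chars.lower] using hmap

-- ===== VERDICT (by name: the statement is the Claim_ definition above) =====
theorem has_valid_refusal_spec : Claim_equal_has_valid_refusal := by
  intro s _
  unfold Spec_has_valid_refusal has_valid_refusal has_valid_refusal_alt
  have hpp : pvRefusalPatternsAlt = pvRefusalPatterns := rfl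
  rw [hpp]
  by_cases h : s.toList = []
  · simp [PySem.Str.len_eq, h, PySem.List.pyRange_one_eq_nil]
  · have hne : s.toList.length ≠ 0 := by simpa [List.length_eq_zero_iff] using h
    have hguard : (PySem.Str.len s == 0) = false := by
      simp only [beq_eq_false_iff_ne, ne_eq, PySem.Str.len_eq]
      exact_mod_cast hne
    rw [hguard]
    simp only [Bool.false_eq_true, if_false]
    rw [Bool.eq_iff_iff]
    simp only [List.any_eq_true, PySem.List.mem_pyRange_one, beq_iff_eq]
    constructor
    · rintro ⟨p, hmem, hin⟩
      have hp : p.toList ≠ [] := by fin_cases hmem <;> decide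
      rw [PySem.Str.isIn_iff_infix, ← PySem.Chars.isIn_iff_infix,
          PySem.Str.toList_lower] at hin
      obtain ⟨i, hi, heq⟩ := (pv_isIn_lower_iff s.toList p.toList hp).mp hin
      refine ⟨(i : Int), ⟨by omega, ?_⟩, p, hmem, ?_⟩
      · rw [PySem.Str.len_eq]; exact_mod_cast hi
      · rw [String.ext_iff, PySem.Str.toList_lower, PySem.Str.toList_slice,
            PySem.Chars.slice_eq_listSlice,
            PySem.List.slice_toNat s.toList (by omega)
              (by rw [PySem.Str.len_eq]; omega)]
        rw [PySem.Str.len_eq]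
        have h2 : ((i : Int) + (p.toList.length : Int)).toNat - ((i : Int)).toNat
            = p.toList.length := by omega
        rw [h2]
        simpa using heq
    · rintro ⟨i, ⟨hi0, hilt⟩, p, hmem, heq⟩
      have hp : p.toList ≠ [] := by fin_cases hmem <;> decide
      refine ⟨p, hmem, ?_⟩
      rw [PySem.Str.isIn_iff_infix, ← PySem.Chars.isIn_iff_infix,
          PySem.Str.toList_lower]
      apply (pv_isIn_lower_iff s.toList p.toList hp).mpr
      refine ⟨i.toNat, ?_, ?_⟩
      · rw [PySem.Str.len_eq] at hilt; omega
      · rw [String.ext_iff, PySem.Str.toList_lower, PySem.Str.toList_slice,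
            PySem.Chars.slice_eq_listSlice,
            PySem.List.slice_toNat s.toList hi0
              (by rw [PySem.Str.len_eq]; omega)] at heq
        rw [PySem.Str.len_eq] at heq
        have h2 : (i + (p.toList.length : Int)).toNat - i.toNat = p.toList.length := by
          omega
        rw [h2] at heq
        simpa using heq
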